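-- pv_equiv track=rewrite | github.com/jayakbarii/j_apriori | app.py | createCell1
-- ===== SOURCE A (Python) =====
-- def createCell1(dataSet):
--     Cell1 = []
--     for t in dataSet:
--         for item in t:
--             if not [item] in Cell1:
--                 Cell1.append([item])
--
--     Cell1.sort()
--     return list(map(frozenset, Cell1))
-- ===== SOURCE B (Python) =====
-- def createCell1(dataSet):
--     items = []
--     for t in dataSet:
--         items.extend(t)
--     items.sort()
--     result = []
--     prev = None
--     for x in items:
--         if prev is None or x != prev:
--             result.append(frozenset([x]))
--         prev = x
--     return result
-- ===== Notes on version B (the rewrite author's own statement) =====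
-- stated objective: faster
-- what changed: A dedups by scanning the accumulator list for [item] (quadratic membership scans) and then sorts the singleton lists; B flattens all transactions, sorts the raw items once, and removes adjacent duplicates in a single linear pass with a running 'previous' value.
import Mathlib
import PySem

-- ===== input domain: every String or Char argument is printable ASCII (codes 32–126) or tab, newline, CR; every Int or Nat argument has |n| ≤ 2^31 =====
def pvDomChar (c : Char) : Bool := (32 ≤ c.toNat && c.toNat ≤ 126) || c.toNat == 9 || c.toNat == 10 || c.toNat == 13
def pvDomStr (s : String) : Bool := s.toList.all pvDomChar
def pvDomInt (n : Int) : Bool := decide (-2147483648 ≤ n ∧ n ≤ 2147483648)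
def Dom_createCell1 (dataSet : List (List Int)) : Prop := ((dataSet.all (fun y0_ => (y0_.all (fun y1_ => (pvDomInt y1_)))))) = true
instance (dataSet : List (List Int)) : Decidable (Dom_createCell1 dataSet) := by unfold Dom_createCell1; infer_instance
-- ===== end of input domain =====

-- B replaces A's quadratic membership-scan dedup (then sort) by flatten + sort + one
-- adjacent-duplicate-removing pass (objective: faster, asymptotic).

-- ===== PORT A =====
-- nested loops appending [item] when not already present, then .sort(), then map(frozenset, …)
def createCell1 (dataSet : List (List Int)) : List (List Int) :=
  let cell1 := dataSet.foldl (fun acc t =>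
      t.foldl (fun acc2 item => if [item] ∈ acc2 then acc2 else acc2 ++ [[item]]) acc) []
  (PySem.List.sorted cell1 (fun x => x) false).map (fun l => (PySem.Set.ofList l : List Int))

-- ===== PORT B =====
-- flatten, sort the ints, single pass keeping x only when it differs from the previous one
def createCell1_alt (dataSet : List (List Int)) : List (List Int) :=
  let items := dataSet.foldl (fun acc t => acc ++ t) []
  let s := PySem.List.sorted items (fun x => x) false
  (s.foldl (fun (st : List (List Int) × Option Int) x =>
      (if st.2 = none ∨ st.2 ≠ some x then st.1 ++ [(PySem.Set.ofList [x] : List Int)] else st.1,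
       some x)) ([], none)).1

-- ===== PRECONDITION & SPEC =====
def Spec_createCell1 (dataSet : List (List Int)) (out : List (List Int)) : Prop := out = createCell1_alt dataSet
instance (dataSet : List (List Int)) (out : List (List Int)) : Decidable (Spec_createCell1 dataSet out) := by unfold Spec_createCell1; infer_instance

-- ===== CLAIM (what is proved, stated in full; the proofs are below) =====
def Claim_equal_createCell1 : Prop := ∀ (dataSet : List (List Int)), Dom_createCell1 dataSet → Spec_createCell1 dataSet (createCell1 dataSet)

-- ===== LEMMAS AND PROOFS =====

-- recursive form of B's single pass (state: the previous element)
def pvAdj (p : Option Int) : List Int → List Int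
  | [] => []
  | x :: xs => if p = none ∨ p ≠ some x then x :: pvAdj (some x) xs else pvAdj (some x) xs

theorem sing_ofList (a : Int) : (PySem.Set.ofList [a] : List Int) = [a] := by
  simp [PySem.Set.ofList, PySem.Set.add, PySem.Set.empty]

theorem pvAdj_foldl (s : List Int) : ∀ (r : List (List Int)) (p : Option Int),
    (s.foldl (fun (st : List (List Int) × Option Int) x =>
      (if st.2 = none ∨ st.2 ≠ some x then st.1 ++ [(PySem.Set.ofList [x] : List Int)] else st.1,
       some x)) (r, p)).1 = r ++ (pvAdj p s).map (fun x => [x]) := by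
  induction s with
  | nil => intro r p; simp [pvAdj]
  | cons x xs ih =>
    intro r p
    simp only [List.foldl_cons, pvAdj]
    by_cases h : p = none ∨ p ≠ some x
    · simp only [if_pos h]
      rw [ih, sing_ofList]
      simp
    · simp only [if_neg h]
      rw [ih]

theorem pvAdj_cons_none (y : Int) (ys : List Int) :
    pvAdj none (y :: ys) = y :: pvAdj (some y) ys := by simp [pvAdj]

theorem pvAdj_cons_self (y : Int) (ys : List Int) :
    pvAdj (some y) (y :: ys) = pvAdj (some y) ys := by simp [pvAdj]

theorem pvAdj_cons_ne (a y : Int) (ys : List Int) (h : a ≠ y) :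
    pvAdj (some a) (y :: ys) = y :: pvAdj (some y) ys := by simp [pvAdj, h]

theorem pvAdj_mem (s : List Int) (hs : s.Pairwise (· ≤ ·)) :
    ∀ (p : Option Int), (∀ a, p = some a → ∀ x ∈ s, a ≤ x) →
    ∀ x, x ∈ pvAdj p s ↔ x ∈ s ∧ p ≠ some x := by
  induction s with
  | nil => intro p _ x; simp [pvAdj]
  | cons y ys ih =>
    intro p hp x
    have hy : ∀ z ∈ ys, y ≤ z := (List.pairwise_cons.mp hs).1
    have hys : ys.Pairwise (· ≤ ·) := (List.pairwise_cons.mp hs).2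
    have ihy := ih hys (some y) (fun a ha z hz => by injection ha with ha; exact ha ▸ hy z hz) x
    rcases p with _ | a
    · rw [pvAdj_cons_none, List.mem_cons, ihy]
      by_cases hxy : x = y
      · simp [hxy]
      · simp only [List.mem_cons]
        constructor
        · rintro (rfl | ⟨hx, _⟩)
          · exact ⟨Or.inl rfl, by simp⟩
          · exact ⟨Or.inr hx, by simp⟩
        · rintro ⟨(rfl | hx), _⟩
          · exact Or.inl rfl
          · exact Or.inr ⟨hx, fun e => hxy (Option.some_injective _ e).symm⟩
    · have ha : ∀ z ∈ y :: ys, a ≤ z := fun z hz => hp a rfl z hz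
      by_cases hay : a = y
      · subst hay
        rw [pvAdj_cons_self, ihy, List.mem_cons]
        constructor
        · rintro ⟨hx, hne⟩; exact ⟨Or.inr hx, hne⟩
        · rintro ⟨(rfl | hx), hne⟩
          · exact (hne rfl).elim
          · exact ⟨hx, hne⟩
      · rw [pvAdj_cons_ne a y ys hay, List.mem_cons, ihy, List.mem_cons]
        have hax : x ∈ ys → a ≠ x := by
          intro hx e
          have h1 : a ≤ y := ha y List.mem_cons_self
          have h2 : y ≤ x := hy x hx
          exact hay (by omega)
        constructor
        · rintro (rfl | ⟨hx, _⟩)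
          · exact ⟨Or.inl rfl, fun e => hay (Option.some_injective _ e)⟩
          · exact ⟨Or.inr hx, fun e => hax hx (Option.some_injective _ e)⟩
        · rintro ⟨(rfl | hx), hne⟩
          · exact Or.inl rfl
          · by_cases hxy : x = y
            · exact Or.inl hxy
            · exact Or.inr ⟨hx, fun e => hxy (Option.some_injective _ e).symm⟩

theorem pvAdj_pairwise (s : List Int) (hs : s.Pairwise (· ≤ ·)) :
    ∀ (p : Option Int), (∀ a, p = some a → ∀ x ∈ s, a ≤ x) →
    (pvAdj p s).Pairwise (· < ·) := by
  induction s with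
  | nil => intro p _; simp [pvAdj]
  | cons y ys ih =>
    intro p hp
    have hy : ∀ z ∈ ys, y ≤ z := (List.pairwise_cons.mp hs).1
    have hys : ys.Pairwise (· ≤ ·) := (List.pairwise_cons.mp hs).2
    have hpy : ∀ a, (some y : Option Int) = some a → ∀ x ∈ ys, a ≤ x :=
      fun a ha z hz => by injection ha with ha; exact ha ▸ hy z hz
    have ihy := ih hys (some y) hpy
    have keep : (y :: pvAdj (some y) ys).Pairwise (· < ·) := by
      refine List.pairwise_cons.mpr ⟨?_, ihy⟩
      intro z hz
      have hm := (pvAdj_mem ys hys (some y) hpy z).mp hz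
      have h1 : y ≤ z := hy z hm.1
      have h2 : y ≠ z := fun e => hm.2 (by rw [e])
      omega
    rcases p with _ | a
    · rw [pvAdj_cons_none]; exact keep
    · by_cases hay : a = y
      · subst hay; rw [pvAdj_cons_self]; exact ihy
      · rw [pvAdj_cons_ne a y ys hay]; exact keep

theorem pvAdj_nodup (s : List Int) (hs : s.Pairwise (· ≤ ·)) :
    (pvAdj none s).Nodup :=
  (pvAdj_pairwise s hs none (by simp)).imp (fun h => by omega)

-- A's inner dedup loop: membership characterisation and Nodup
theorem pvAFold_mem (l : List Int) : ∀ (acc : List (List Int)) (z : List Int),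
    z ∈ l.foldl (fun acc2 item => if [item] ∈ acc2 then acc2 else acc2 ++ [[item]]) acc ↔
      z ∈ acc ∨ ∃ x ∈ l, z = [x] := by
  induction l with
  | nil => intro acc z; simp
  | cons x xs ih =>
    intro acc z
    simp only [List.foldl_cons, ih]
    by_cases h : ([x] : List Int) ∈ acc
    · simp only [if_pos h]
      constructor
      · rintro (hz | hz); · exact Or.inl hz
        · obtain ⟨w, hw, rfl⟩ := hz; exact Or.inr ⟨w, by simp [hw], rfl⟩
      · rintro (hz | ⟨w, hw, rfl⟩); · exact Or.inl hz
        · rcases List.mem_cons.mp hw with rfl | hw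
          · exact Or.inl h
          · exact Or.inr ⟨w, hw, rfl⟩
    · simp only [if_neg h, List.mem_append, List.mem_singleton]
      constructor
      · rintro ((hz | rfl) | ⟨w, hw, rfl⟩)
        · exact Or.inl hz
        · exact Or.inr ⟨x, by simp, rfl⟩
        · exact Or.inr ⟨w, by simp [hw], rfl⟩
      · rintro (hz | ⟨w, hw, rfl⟩)
        · exact Or.inl (Or.inl hz)
        · rcases List.mem_cons.mp hw with rfl | hw
          · exact Or.inl (Or.inr rfl)
          · exact Or.inr ⟨w, hw, rfl⟩

theorem pvAFold_nodup (l : List Int) : ∀ (acc : List (List Int)), acc.Nodup →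
    (l.foldl (fun acc2 item => if [item] ∈ acc2 then acc2 else acc2 ++ [[item]]) acc).Nodup := by
  induction l with
  | nil => intro acc h; simpa
  | cons x xs ih =>
    intro acc h
    simp only [List.foldl_cons]
    by_cases hx : ([x] : List Int) ∈ acc
    · simpa [hx] using ih acc h
    · refine (if_neg hx) ▸ ih _ ?_
      exact List.nodup_append.mpr ⟨h, List.nodup_singleton _,
        fun a ha b hb => by simp only [List.mem_singleton] at hb; exact fun e => hx ((hb ▸ e) ▸ ha)⟩

theorem foldl_append_flatten (l : List (List Int)) : ∀ (acc : List Int),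
    l.foldl (fun a t => a ++ t) acc = acc ++ l.flatten := by
  induction l with
  | nil => intro acc; simp
  | cons t ts ih => intro acc; simp [List.foldl_cons, ih]

-- ===== VERDICT (by name: the statement is the Claim_ definition above) =====
theorem createCell1_spec : Claim_equal_createCell1 := by
  intro dataSet _
  unfold Spec_createCell1 createCell1 createCell1_alt
  simp only []
  set flat := dataSet.flatten with hflat
  -- A's accumulator over the flattened data
  have hA : dataSet.foldl (fun acc t =>
      t.foldl (fun acc2 item => if [item] ∈ acc2 then acc2 else acc2 ++ [[item]]) acc) [] =
      flat.foldl (fun acc2 item => if [item] ∈ acc2 then acc2 else acc2 ++ [[item]]) [] := by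
    rw [hflat, List.foldl_flatten]
  -- B's items is the flattened data
  have hB : dataSet.foldl (fun acc t => acc ++ t) [] = flat := by
    simpa using foldl_append_flatten dataSet []
  rw [hA, hB]
  set cell1 := flat.foldl (fun acc2 item => if [item] ∈ acc2 then acc2 else acc2 ++ [[item]])
      ([] : List (List Int)) with hcell
  set S := PySem.List.sorted flat (fun x => x) false with hS
  have hSle : S.Pairwise (· ≤ ·) := PySem.List.sorted_pairwise flat (fun x => x)
  have hSmem : ∀ x, x ∈ S ↔ x ∈ flat := fun x => PySem.List.mem_sorted flat (fun x => x) false x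
  -- rewrite B with pvAdj
  rw [pvAdj_foldl S [] none]
  simp only [List.nil_append]
  -- the keep-list membership / order facts
  have hadjmem : ∀ x, x ∈ pvAdj none S ↔ x ∈ flat := by
    intro x
    rw [pvAdj_mem S hSle none (by simp) x, hSmem]
    simp
  have hadjlt : (pvAdj none S).Pairwise (· < ·) := pvAdj_pairwise S hSle none (by simp)
  -- A's cell1: members and Nodup
  have hcmem : ∀ z, z ∈ cell1 ↔ ∃ x ∈ flat, z = [x] := by
    intro z; rw [hcell, pvAFold_mem]; simp
  have hcnodup : cell1.Nodup := pvAFold_nodup flat [] List.nodup_nil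
  -- target list equality via the sorted-characterisation lemma
  have key : PySem.List.sorted cell1 (fun x => x) false =
      (pvAdj none S).map (fun x => [x]) := by
    have hinst : @PySem.List.sorted (List ℤ) (List ℤ) List.instLT (fun a b => a.decidableLT b) =
        @PySem.List.sorted (List ℤ) (List ℤ) List.instLinearOrder.toLT LinearOrder.toDecidableLT := by
      congr 1
      exact Subsingleton.elim _ _
    rw [hinst]
    refine PySem.List.sorted_eq_of_perm_of_pairwise_lt cell1 _ (fun x => x) ?_ ?_
    · refine (List.perm_ext_iff_of_nodup ?_ hcnodup).mpr ?_
      · exact (pvAdj_nodup S hSle).map (fun a b h => by injection h)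
      · intro z
        rw [hcmem]
        simp only [List.mem_map]
        constructor
        · rintro ⟨x, hx, rfl⟩; exact ⟨x, (hadjmem x).mp hx, rfl⟩
        · rintro ⟨x, hx, rfl⟩; exact ⟨x, (hadjmem x).mpr hx, rfl⟩
    · refine hadjlt.map (fun x => [x]) ?_
      intro a b h
      show List.Lex (· < ·) [a] [b]
      exact List.Lex.rel h
  rw [key]
  -- mapping "frozenset" over singleton lists is the identity
  rw [List.map_map]
  apply List.map_congr_left
  intro x _
  simp [sing_ofList]
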